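-- pv_equiv track=rewrite | github.com/RacineDuCiel/Projet-EASM | workers/src/tech_mapping.py | get_technology_summary
-- ===== SOURCE A (Python) =====
-- from typing import List, Set, Dict, Any, Optional, Tuple
--
-- def get_technology_summary(technologies: List[str]) -> str:
--     """
--     Get a human-readable summary of detected technologies.
--
--     Args:
--         technologies: List of detected technology names
--
--     Returns:
--         Summary string
--     """
--     if not technologies:
--         return "No technologies detected"
--
--     # Group by category
--     cms = []
--     frameworks = []
--     servers = []
--     databases = []
--     other = []
--
--     cms_keys = {"wordpress", "drupal", "joomla", "magento", "shopify", "ghost", "typo3"}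
--     framework_keys = {"laravel", "django", "flask", "spring", "express", "rails", "react", "angular", "vue"}
--     server_keys = {"nginx", "apache", "iis", "tomcat", "caddy"}
--     db_keys = {"mysql", "postgresql", "mongodb", "redis", "elasticsearch"}
--
--     for tech in technologies:
--         tech_lower = tech.lower()
--         matched = False
--
--         for key in cms_keys:
--             if key in tech_lower:
--                 cms.append(tech)
--                 matched = True
--                 break
--
--         if not matched:
--             for key in framework_keys:
--                 if key in tech_lower:
--                     frameworks.append(tech)
--                     matched = True
--                     break
--
--         if not matched:
--             for key in server_keys:
--                 if key in tech_lower: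
--                     servers.append(tech)
--                     matched = True
--                     break
--
--         if not matched:
--             for key in db_keys:
--                 if key in tech_lower:
--                     databases.append(tech)
--                     matched = True
--                     break
--
--         if not matched:
--             other.append(tech)
--
--     parts = []
--     if servers:
--         parts.append(f"Server: {', '.join(servers[:2])}")
--     if cms:
--         parts.append(f"CMS: {', '.join(cms[:2])}")
--     if frameworks:
--         parts.append(f"Framework: {', '.join(frameworks[:2])}")
--     if databases:
--         parts.append(f"DB: {', '.join(databases[:2])}")
--
--     if not parts and other:
--         parts.append(f"Tech: {', '.join(other[:3])}")
--
--     return " | ".join(parts) if parts else f"Detected: {', '.join(technologies[:3])}"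
-- ===== SOURCE B (Python) =====
-- KEYWORDS = {
--     "cms": ("wordpress", "drupal", "joomla", "magento", "shopify", "ghost", "typo3"),
--     "framework": ("laravel", "django", "flask", "spring", "express", "rails", "react", "angular", "vue"),
--     "server": ("nginx", "apache", "iis", "tomcat", "caddy"),
--     "db": ("mysql", "postgresql", "mongodb", "redis", "elasticsearch"),
-- }
--
--
-- def get_technology_summary(technologies):
--     if not technologies:
--         return "No technologies detected"
--
--     # Staged sieve: each category filters its matches out of a shrinking
--     # 'remaining' list; whatever survives every sieve is "other".
--     groups = {}
--     remaining = technologies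
--     for name, keys in KEYWORDS.items():
--         hit = lambda t: any(k in t.lower() for k in keys)
--         groups[name] = [t for t in remaining if hit(t)]
--         remaining = [t for t in remaining if not hit(t)]
--
--     parts = [
--         f"{label}: {', '.join(groups[name][:2])}"
--         for label, name in (("Server", "server"), ("CMS", "cms"),
--                             ("Framework", "framework"), ("DB", "db"))
--         if groups[name]
--     ]
--     if not parts and remaining:
--         parts = [f"Tech: {', '.join(remaining[:3])}"]
--
--     return " | ".join(parts) if parts else f"Detected: {', '.join(technologies[:3])}"
-- ===== Notes on version B (the rewrite author's own statement) =====
-- stated objective: alternative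
-- what changed: Replaces A's single pass that classifies each item via a per-item first-match cascade over five named accumulators by four staged sieve passes: each category filters its matches out of a shrinking 'remaining' list with comprehensions, and 'other' is what survives every sieve.
import Mathlib
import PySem

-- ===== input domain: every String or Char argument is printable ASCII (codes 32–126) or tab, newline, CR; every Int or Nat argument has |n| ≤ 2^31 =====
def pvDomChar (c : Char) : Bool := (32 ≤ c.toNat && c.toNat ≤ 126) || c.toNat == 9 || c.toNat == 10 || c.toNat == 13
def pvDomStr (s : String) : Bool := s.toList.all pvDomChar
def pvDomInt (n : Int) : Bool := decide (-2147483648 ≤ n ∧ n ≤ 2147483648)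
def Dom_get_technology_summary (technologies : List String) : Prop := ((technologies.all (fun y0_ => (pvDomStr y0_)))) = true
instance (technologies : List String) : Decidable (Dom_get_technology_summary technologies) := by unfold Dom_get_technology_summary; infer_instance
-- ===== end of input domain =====

-- B replaces A's single pass with a per-item first-match cascade by four staged sieve passes:
-- each category filters its matches out of a shrinking 'remaining' list (objective: alternative).

-- ===== PORT A =====
-- A's loop state is the tuple (cms, frameworks, servers, databases, other).
-- 'for key in S: if key in tech_lower: …; break' over a Python set only tests EXISTENCE of a
-- matching key, so it is order-independent and is ported exactly as '.any' over the set.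
def get_technology_summary (technologies : List String) : String :=
  if technologies = [] then "No technologies detected" else
  let cms_keys : PySem.Set String := PySem.Set.ofList ["wordpress", "drupal", "joomla", "magento", "shopify", "ghost", "typo3"]
  let framework_keys : PySem.Set String := PySem.Set.ofList ["laravel", "django", "flask", "spring", "express", "rails", "react", "angular", "vue"]
  let server_keys : PySem.Set String := PySem.Set.ofList ["nginx", "apache", "iis", "tomcat", "caddy"]
  let db_keys : PySem.Set String := PySem.Set.ofList ["mysql", "postgresql", "mongodb", "redis", "elasticsearch"]
  let st := technologies.foldl (fun st tech =>
      match st with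
      | (cms, frameworks, servers, databases, other) =>
        let tech_lower := PySem.Str.lower tech
        if cms_keys.any (fun k => PySem.Str.isIn k tech_lower) then
          (cms ++ [tech], frameworks, servers, databases, other)
        else if framework_keys.any (fun k => PySem.Str.isIn k tech_lower) then
          (cms, frameworks ++ [tech], servers, databases, other)
        else if server_keys.any (fun k => PySem.Str.isIn k tech_lower) then
          (cms, frameworks, servers ++ [tech], databases, other)
        else if db_keys.any (fun k => PySem.Str.isIn k tech_lower) then
          (cms, frameworks, servers, databases ++ [tech], other)
        else
          (cms, frameworks, servers, databases, other ++ [tech]))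
    (([], [], [], [], []) : List String × List String × List String × List String × List String)
  match st with
  | (cms, frameworks, servers, databases, other) =>
    let parts : List String := []
    let parts := if servers ≠ [] then parts ++ ["Server: " ++ PySem.Str.join ", " (PySem.List.slice servers none (some 2))] else parts
    let parts := if cms ≠ [] then parts ++ ["CMS: " ++ PySem.Str.join ", " (PySem.List.slice cms none (some 2))] else parts
    let parts := if frameworks ≠ [] then parts ++ ["Framework: " ++ PySem.Str.join ", " (PySem.List.slice frameworks none (some 2))] else parts
    let parts := if databases ≠ [] then parts ++ ["DB: " ++ PySem.Str.join ", " (PySem.List.slice databases none (some 2))] else parts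
    let parts := if parts = [] ∧ other ≠ [] then parts ++ ["Tech: " ++ PySem.Str.join ", " (PySem.List.slice other none (some 3))] else parts
    if parts ≠ [] then PySem.Str.join " | " parts
    else "Detected: " ++ PySem.Str.join ", " (PySem.List.slice technologies none (some 3))

-- ===== PORT B =====
-- Source B's module-level KEYWORDS dict, as an association list in insertion order.
def pvKeywords : List (String × List String) :=
  [("cms", ["wordpress", "drupal", "joomla", "magento", "shopify", "ghost", "typo3"]),
   ("framework", ["laravel", "django", "flask", "spring", "express", "rails", "react", "angular", "vue"]),
   ("server", ["nginx", "apache", "iis", "tomcat", "caddy"]),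
   ("db", ["mysql", "postgresql", "mongodb", "redis", "elasticsearch"])]

def get_technology_summary_alt (technologies : List String) : String :=
  if technologies = [] then "No technologies detected" else
  -- staged sieve over KEYWORDS.items(): groups[name] = matches of 'remaining'; remaining shrinks
  let st := pvKeywords.foldl
      (fun (st : PySem.Dict String (List String) × List String) p =>
        let hit := fun t => p.2.any (fun k => PySem.Str.isIn k (PySem.Str.lower t))
        (st.1.insert p.1 (st.2.filter hit), st.2.filter (fun t => !(hit t))))
      (PySem.Dict.empty, technologies)
  let groups := st.1
  let remaining := st.2
  let parts := ([("Server", "server"), ("CMS", "cms"), ("Framework", "framework"), ("DB", "db")] : List (String × String)).foldl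
      (fun acc lp =>
        let g := groups.getD lp.2 []
        if g ≠ [] then acc ++ [lp.1 ++ ": " ++ PySem.Str.join ", " (PySem.List.slice g none (some 2))] else acc) []
  let parts := if parts = [] ∧ remaining ≠ [] then
      ["Tech: " ++ PySem.Str.join ", " (PySem.List.slice remaining none (some 3))] else parts
  if parts ≠ [] then PySem.Str.join " | " parts
  else "Detected: " ++ PySem.Str.join ", " (PySem.List.slice technologies none (some 3))

-- ===== PRECONDITION & SPEC =====
def Spec_get_technology_summary (technologies : List String) (out : String) : Prop := out = get_technology_summary_alt technologies
instance (technologies : List String) (out : String) : Decidable (Spec_get_technology_summary technologies out) := by unfold Spec_get_technology_summary; infer_instance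

-- ===== CLAIM =====
def Claim_equal_get_technology_summary : Prop := ∀ (technologies : List String), Dom_get_technology_summary technologies → Spec_get_technology_summary technologies (get_technology_summary technologies)

-- ===== LEMMAS AND PROOFS =====

-- The four membership tests, shared by both proofs (A's Set literals reduce to these lists).
def pvP1 (t : String) : Bool := (["wordpress", "drupal", "joomla", "magento", "shopify", "ghost", "typo3"] : List String).any (fun k => PySem.Str.isIn k (PySem.Str.lower t))
def pvP2 (t : String) : Bool := (["laravel", "django", "flask", "spring", "express", "rails", "react", "angular", "vue"] : List String).any (fun k => PySem.Str.isIn k (PySem.Str.lower t))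
def pvP3 (t : String) : Bool := (["nginx", "apache", "iis", "tomcat", "caddy"] : List String).any (fun k => PySem.Str.isIn k (PySem.Str.lower t))
def pvP4 (t : String) : Bool := (["mysql", "postgresql", "mongodb", "redis", "elasticsearch"] : List String).any (fun k => PySem.Str.isIn k (PySem.Str.lower t))

-- A's loop body, named for the proof (definitionally equal to the lambda in the A port).
def pvStepA (st : List String × List String × List String × List String × List String) (t : String) :
    List String × List String × List String × List String × List String :=
  match st with
  | (a, b, c, d, e) =>
    if pvP1 t then (a ++ [t], b, c, d, e)
    else if pvP2 t then (a, b ++ [t], c, d, e)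
    else if pvP3 t then (a, b, c ++ [t], d, e)
    else if pvP4 t then (a, b, c, d ++ [t], e)
    else (a, b, c, d, e ++ [t])

-- B's staged sieves, named: the four filter stages.
def pvS1 (ts : List String) : List String := ts.filter pvP1
def pvR1 (ts : List String) : List String := ts.filter (fun t => !(pvP1 t))
def pvS2 (ts : List String) : List String := (pvR1 ts).filter pvP2
def pvR2 (ts : List String) : List String := (pvR1 ts).filter (fun t => !(pvP2 t))
def pvS3 (ts : List String) : List String := (pvR2 ts).filter pvP3
def pvR3 (ts : List String) : List String := (pvR2 ts).filter (fun t => !(pvP3 t))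
def pvS4 (ts : List String) : List String := (pvR3 ts).filter pvP4
def pvR4 (ts : List String) : List String := (pvR3 ts).filter (fun t => !(pvP4 t))

-- A's loop, from an arbitrary accumulator, appends exactly B's staged sieve filters.
theorem pvFoldA_inv (ts : List String) (a b c d e : List String) :
    ts.foldl pvStepA (a, b, c, d, e)
      = (a ++ pvS1 ts, b ++ pvS2 ts, c ++ pvS3 ts, d ++ pvS4 ts, e ++ pvR4 ts) := by
  induction ts generalizing a b c d e with
  | nil => simp [pvS1, pvS2, pvS3, pvS4, pvR1, pvR2, pvR3, pvR4]
  | cons t rest ih =>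
    rw [List.foldl_cons]
    cases h1 : pvP1 t <;> cases h2 : pvP2 t <;> cases h3 : pvP3 t <;> cases h4 : pvP4 t <;>
      simp only [pvStepA, h1, h2, h3, h4, if_true, if_false, Bool.false_eq_true] <;>
      rw [ih] <;>
      simp [pvS1, pvS2, pvS3, pvS4, pvR1, pvR2, pvR3, pvR4, h1, h2, h3, h4]

-- The groups dict B has built after its four sieve passes.
def pvGroups (a b c d : List String) : PySem.Dict String (List String) :=
  PySem.Dict.mk [("cms", a), ("framework", b), ("server", c), ("db", d)]

-- getD at the four literal keys reads the matching component.
theorem pvGroups_cms (a b c d : List String) : (pvGroups a b c d).getD "cms" [] = a := rfl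
theorem pvGroups_fw (a b c d : List String) : (pvGroups a b c d).getD "framework" [] = b := rfl
theorem pvGroups_srv (a b c d : List String) : (pvGroups a b c d).getD "server" [] = c := rfl
theorem pvGroups_db (a b c d : List String) : (pvGroups a b c d).getD "db" [] = d := rfl

-- Proof-only repackagings of the two ports' assembly tails.
def pvAssembleA (st : List String × List String × List String × List String × List String)
    (technologies : List String) : String :=
  match st with
  | (cms, frameworks, servers, databases, other) =>
    let parts : List String := []
    let parts := if servers ≠ [] then parts ++ ["Server: " ++ PySem.Str.join ", " (PySem.List.slice servers none (some 2))] else parts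
    let parts := if cms ≠ [] then parts ++ ["CMS: " ++ PySem.Str.join ", " (PySem.List.slice cms none (some 2))] else parts
    let parts := if frameworks ≠ [] then parts ++ ["Framework: " ++ PySem.Str.join ", " (PySem.List.slice frameworks none (some 2))] else parts
    let parts := if databases ≠ [] then parts ++ ["DB: " ++ PySem.Str.join ", " (PySem.List.slice databases none (some 2))] else parts
    let parts := if parts = [] ∧ other ≠ [] then parts ++ ["Tech: " ++ PySem.Str.join ", " (PySem.List.slice other none (some 3))] else parts
    if parts ≠ [] then PySem.Str.join " | " parts
    else "Detected: " ++ PySem.Str.join ", " (PySem.List.slice technologies none (some 3))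

def pvAssembleB (groups : PySem.Dict String (List String)) (remaining : List String)
    (technologies : List String) : String :=
  let parts := ([("Server", "server"), ("CMS", "cms"), ("Framework", "framework"), ("DB", "db")] : List (String × String)).foldl
      (fun acc lp =>
        let g := groups.getD lp.2 []
        if g ≠ [] then acc ++ [lp.1 ++ ": " ++ PySem.Str.join ", " (PySem.List.slice g none (some 2))] else acc) []
  let parts := if parts = [] ∧ remaining ≠ [] then
      ["Tech: " ++ PySem.Str.join ", " (PySem.List.slice remaining none (some 3))] else parts
  if parts ≠ [] then PySem.Str.join " | " parts
  else "Detected: " ++ PySem.Str.join ", " (PySem.List.slice technologies none (some 3))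

theorem pv_A_eq (ts : List String) (h : ¬ ts = []) :
    get_technology_summary ts = pvAssembleA (ts.foldl pvStepA ([], [], [], [], [])) ts := by
  unfold get_technology_summary
  rw [if_neg h]
  rfl

theorem pv_B_eq (ts : List String) (h : ¬ ts = []) :
    get_technology_summary_alt ts
      = pvAssembleB (pvGroups (pvS1 ts) (pvS2 ts) (pvS3 ts) (pvS4 ts)) (pvR4 ts) ts := by
  unfold get_technology_summary_alt
  rw [if_neg h]
  rfl

-- The two assembly tails agree on matching components.
theorem pv_assemble_eq (a b c d e : List String) (ts : List String) :
    pvAssembleA (a, b, c, d, e) ts = pvAssembleB (pvGroups a b c d) e ts := by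
  unfold pvAssembleA pvAssembleB
  simp only [List.foldl, pvGroups_cms, pvGroups_fw, pvGroups_srv, pvGroups_db]
  by_cases hc : c = [] <;> by_cases ha : a = [] <;> by_cases hb : b = [] <;> by_cases hd : d = [] <;>
    simp [hc, ha, hb, hd]

-- ===== VERDICT =====
theorem get_technology_summary_spec : Claim_equal_get_technology_summary := by
  intro ts _
  unfold Spec_get_technology_summary
  by_cases h : ts = []
  · subst h; rfl
  · rw [pv_A_eq ts h, pv_B_eq ts h, pvFoldA_inv]
    simpa using pv_assemble_eq (pvS1 ts) (pvS2 ts) (pvS3 ts) (pvS4 ts) (pvR4 ts) ts
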